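-- pv_equiv track=rewrite | github.com/gnlenfn/DailyProblemSolving | 프로그래머스/unrated/150368. 이모티콘 할인행사/이모티콘 할인행사.py | solution
-- ===== SOURCE A (Python) =====
-- from itertools import product
--
-- def solution(users, emoticons):
--     plus_ret, profit_ret = 0, 0  # 최종 플러스 가입자 수, 최종 이모티콘 판매 수익
--     discounts = product([10, 20, 30, 40], repeat=len(emoticons))  # 모든 할인율 중복 순열
--     for dc in discounts:
--         plus_users = 0  # 이번 할인 케이스의 플러스 가입자 수
--         profit = 0      # 이번 할인 케이스의 총 이모티콘 매출
--
--         for threshold, plus_limit in users: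
--             # 유저 한 명씩 순회
--             paid = 0
--
--             for i in range(len(emoticons)):
--                 # 이번 할인 상황에 맞게 유저 한 명 구매 결과 확인
--                 if dc[i] >= threshold:  # 할인율이 원하는 것 이상
--                     paid += emoticons[i] * (100 - dc[i]) // 100  # 정수로 쓸라고
--
--             if paid >= plus_limit:  # 기준치 이상 이모티콘 샀음 -> 플러스로 전환
--                 paid = 0
--                 plus_users += 1
--             else:                   # 그냥 이모티콘 구매
--                 profit += paid
--
--         if plus_ret < plus_users:  # 이모티콘 플러스 가입자 늘었음!
--             plus_ret = plus_users
--             profit_ret = profit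
--
--         elif plus_ret == plus_users and profit_ret < profit:  # 최대 이익 더 큰 경우
--             profit_ret = profit
--
--     return [plus_ret, profit_ret]
-- ===== SOURCE B (Python) =====
-- def solution(users, emoticons):
--     n = len(emoticons)
--     best = [0, 0]
--
--     def leaf(paid):
--         plus, profit = 0, 0
--         for (_, limit), p in zip(users, paid):
--             if p >= limit:
--                 plus += 1
--             else:
--                 profit += p
--         if best[0] < plus:
--             best[0], best[1] = plus, profit
--         elif best[0] == plus and best[1] < profit:
--             best[1] = profit
--
--     def dfs(i, paid):
--         if i == n:
--             leaf(paid)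
--             return
--         e = emoticons[i]
--         for rate in (10, 20, 30, 40):
--             dfs(i + 1,
--                 [p + (e * (100 - rate) // 100 if rate >= th else 0)
--                  for (th, _), p in zip(users, paid)])
--
--     dfs(0, [0] * len(users))
--     return best
-- ===== Notes on version B (the rewrite author's own statement) =====
-- stated objective: alternative
-- what changed: B replaces the itertools.product enumeration with full per-combination re-simulation by a backtracking DFS over emoticons that carries the accumulated amount paid per user, so each leaf only checks thresholds instead of re-scanning all emoticons per user.
import Mathlib
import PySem

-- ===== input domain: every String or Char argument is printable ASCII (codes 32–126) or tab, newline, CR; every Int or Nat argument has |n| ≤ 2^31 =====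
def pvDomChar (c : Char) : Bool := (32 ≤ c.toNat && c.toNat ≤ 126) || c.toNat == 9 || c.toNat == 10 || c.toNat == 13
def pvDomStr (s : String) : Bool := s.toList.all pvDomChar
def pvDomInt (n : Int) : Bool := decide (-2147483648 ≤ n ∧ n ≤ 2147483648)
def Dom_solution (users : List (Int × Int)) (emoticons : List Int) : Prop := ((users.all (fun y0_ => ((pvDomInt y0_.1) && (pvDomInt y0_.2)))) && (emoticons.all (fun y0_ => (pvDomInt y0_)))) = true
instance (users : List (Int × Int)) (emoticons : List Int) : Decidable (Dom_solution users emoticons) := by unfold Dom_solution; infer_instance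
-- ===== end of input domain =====

-- B replaces A's itertools.product enumeration (full re-simulation of every user over every
-- emoticon for each combination) by a backtracking DFS over the emoticons that carries the
-- accumulated per-user paid amounts; objective: alternative decomposition.

-- ===== PORT A =====
-- itertools.product([10,20,30,40], repeat=n) in its order (first coordinate varies slowest)
def prodsA : Nat → List (List Int)
  | 0 => [[]]
  | n+1 => ([10, 20, 30, 40] : List Int).flatMap (fun r => (prodsA n).map (fun t => r :: t))

def solution (users : List (Int × Int)) (emoticons : List Int) : List Int :=
  -- dc[i] and emoticons[i] with 0 ≤ i < len(emoticons) = len(dc): pyGetD is exact here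
  let res := (prodsA emoticons.length).foldl (fun (acc : Int × Int) dc =>
      let pp := users.foldl (fun (s : Int × Int) u =>
          let paid := (PySem.List.pyRange 0 (PySem.List.len emoticons) 1).foldl (fun paid i =>
              if PySem.List.pyGetD dc i 0 ≥ u.1 then
                paid + PySem.Int.floordiv (PySem.List.pyGetD emoticons i 0 * (100 - PySem.List.pyGetD dc i 0)) 100
              else paid) 0
          if paid ≥ u.2 then (s.1 + 1, s.2) else (s.1, s.2 + paid)) ((0 : Int), (0 : Int))
      if acc.1 < pp.1 then pp
      else if acc.1 = pp.1 ∧ acc.2 < pp.2 then (acc.1, pp.2) else acc) ((0 : Int), (0 : Int))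
  [res.1, res.2]

-- ===== PORT B =====
-- best-pair update (the two-branch if/elif at the end of B's leaf closure)
def updB (best pp : Int × Int) : Int × Int :=
  if best.1 < pp.1 then pp
  else if best.1 = pp.1 ∧ best.2 < pp.2 then (best.1, pp.2) else best

-- leaf(paid): count plus users / sum profit from the accumulated paid amounts
def leafB (users : List (Int × Int)) (paid : List Int) : Int × Int :=
  (users.zip paid).foldl (fun (s : Int × Int) up =>
      if up.2 ≥ up.1.2 then (s.1 + 1, s.2) else (s.1, s.2 + up.2)) ((0 : Int), (0 : Int))

-- the list comprehension building the new paid vector when rate is assigned to emoticon e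
def stepB (users : List (Int × Int)) (paid : List Int) (e rate : Int) : List Int :=
  (users.zip paid).map (fun up =>
    up.2 + (if rate ≥ up.1.1 then PySem.Int.floordiv (e * (100 - rate)) 100 else 0))

def dfsB (users : List (Int × Int)) : List Int → List Int → Int × Int → Int × Int
  | [], paid, best => updB best (leafB users paid)
  | e :: rest, paid, best =>
      ([10, 20, 30, 40] : List Int).foldl (fun b rate => dfsB users rest (stepB users paid e rate) b) best

def solution_alt (users : List (Int × Int)) (emoticons : List Int) : List Int :=
  let best := dfsB users emoticons (users.map (fun _ => 0)) ((0 : Int), (0 : Int))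
  [best.1, best.2]

-- ===== PRECONDITION & SPEC =====
def Spec_solution (users : List (Int × Int)) (emoticons : List Int) (out : List Int) : Prop := out = solution_alt users emoticons
instance (users : List (Int × Int)) (emoticons : List Int) (out : List Int) : Decidable (Spec_solution users emoticons out) := by unfold Spec_solution; infer_instance

-- ===== CLAIM (what is proved, stated in full; the proofs are below) =====
def Claim_equal_solution : Prop := ∀ (users : List (Int × Int)) (emoticons : List Int), Dom_solution users emoticons → Spec_solution users emoticons (solution users emoticons)

-- ===== LEMMAS AND PROOFS =====

-- amount a user with threshold t would pay in total under discount tuple dc, prices ems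
def contribP (t e r : Int) : Int :=
  if r ≥ t then PySem.Int.floordiv (e * (100 - r)) 100 else 0

def paidFor (t : Int) (dc ems : List Int) : Int :=
  (dc.zip ems).foldl (fun p de =>
    if de.1 ≥ t then p + PySem.Int.floordiv (de.2 * (100 - de.1)) 100 else p) 0

-- every tuple produced by prodsA n has length n
theorem prodsA_length : ∀ n, ∀ dc ∈ prodsA n, dc.length = n := by
  intro n
  induction n with
  | zero => intro dc h; simp [prodsA] at h; simp [h]
  | succ m ih =>
    intro dc h
    simp only [prodsA, List.mem_flatMap, List.mem_map] at h
    obtain ⟨r, _, t, ht, rfl⟩ := h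
    simp [ih t ht]

-- shifting the initial accumulator out of paidFor's fold
theorem paidFor_fold_shift (t : Int) :
    ∀ (l : List (Int × Int)) (init : Int),
      l.foldl (fun p de => if de.1 ≥ t then p + PySem.Int.floordiv (de.2 * (100 - de.1)) 100 else p) init
        = init + l.foldl (fun p de => if de.1 ≥ t then p + PySem.Int.floordiv (de.2 * (100 - de.1)) 100 else p) 0 := by
  intro l
  induction l with
  | nil => intro init; simp
  | cons de rest ih =>
    intro init
    simp only [List.foldl_cons]
    rw [ih, ih (if de.1 ≥ t then _ else _)]
    split <;> omega

theorem paidFor_cons (t r e : Int) (dc ems : List Int) :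
    paidFor t (r :: dc) (e :: ems) = contribP t e r + paidFor t dc ems := by
  simp only [paidFor, contribP, List.zip_cons_cons, List.foldl_cons]
  rw [paidFor_fold_shift]
  split <;> simp

-- index-based double fold (A's inner loop) = fold over the zipped lists
theorem fold_range_zip {α β γ : Type} (f : γ → α → β → γ) (da : α) (db : β) :
    ∀ (xs : List α) (ys : List β) (init : γ), xs.length = ys.length →
      (List.range ys.length).foldl (fun acc k => f acc (xs.getD k da) (ys.getD k db)) init
        = (xs.zip ys).foldl (fun acc p => f acc p.1 p.2) init := by
  intro xs
  induction xs with
  | nil => intro ys init h; cases ys <;> simp_all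
  | cons x xs' ih =>
    intro ys init h
    cases ys with
    | nil => simp at h
    | cons y ys' =>
      simp only [List.length_cons, List.range_succ_eq_map, List.foldl_cons, List.foldl_map,
        List.getD_cons_zero, List.getD_cons_succ, List.zip_cons_cons]
      exact ih ys' (f init x y) (by simpa using h)

-- A's inner per-user loop computes paidFor
theorem inner_loop_eq (t : Int) (dc ems : List Int) (h : dc.length = ems.length) :
    (PySem.List.pyRange 0 (PySem.List.len ems) 1).foldl (fun paid i =>
        if PySem.List.pyGetD dc i 0 ≥ t then
          paid + PySem.Int.floordiv (PySem.List.pyGetD ems i 0 * (100 - PySem.List.pyGetD dc i 0)) 100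
        else paid) 0
      = paidFor t dc ems := by
  rw [PySem.List.len_eq, PySem.List.pyRange_one]
  simp only [List.foldl_map, zero_add, PySem.List.pyGetD_natCast]
  rw [show ((ems.length : Int) - 0).toNat = ems.length by omega]
  exact fold_range_zip (fun p d e => if d ≥ t then p + PySem.Int.floordiv (e * (100 - d)) 100 else p)
    0 0 dc ems 0 h

-- the per-user fold over an F-valued paid vector is leafB on users.map F
theorem leaf_eq (users : List (Int × Int)) (F : (Int × Int) → Int) :
    ∀ init : Int × Int,
      (users.zip (users.map F)).foldl (fun s up =>
          if up.2 ≥ up.1.2 then (s.1 + 1, s.2) else (s.1, s.2 + up.2)) init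
        = users.foldl (fun s u => if F u ≥ u.2 then (s.1 + 1, s.2) else (s.1, s.2 + F u)) init := by
  induction users with
  | nil => intro init; simp
  | cons u rest ih => intro init; simp only [List.map_cons, List.zip_cons_cons, List.foldl_cons]; exact ih _

-- stepB on a mapped paid vector stays a mapped paid vector
theorem stepB_map (users : List (Int × Int)) (F : (Int × Int) → Int) (e r : Int) :
    stepB users (users.map F) e r = users.map (fun u => F u + contribP u.1 e r) := by
  unfold stepB contribP
  induction users with
  | nil => simp
  | cons u rest ih => simp only [List.map_cons, List.zip_cons_cons, List.map_cons] at *; rw [ih]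

-- folding over a flatMap
theorem foldl_flatMap' {α β γ : Type} (g : α → List β) (f : γ → β → γ) :
    ∀ (l : List α) (init : γ),
      (l.flatMap g).foldl f init = l.foldl (fun b x => (g x).foldl f b) init := by
  intro l
  induction l with
  | nil => intro init; simp
  | cons x rest ih => intro init; simp only [List.flatMap_cons, List.foldl_append, List.foldl_cons]; exact ih _

-- MAIN: dfsB from an accumulated paid vector = A-style fold over all remaining tuples
theorem dfsB_eq (users : List (Int × Int)) :
    ∀ (ems : List Int) (F : (Int × Int) → Int) (best : Int × Int),
      dfsB users ems (users.map F) best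
        = (prodsA ems.length).foldl (fun acc dc =>
            updB acc (leafB users (users.map (fun u => F u + paidFor u.1 dc ems)))) best := by
  intro ems
  induction ems with
  | nil =>
    intro F best
    simp [dfsB, prodsA, paidFor]
  | cons e rest ih =>
    intro F best
    simp only [dfsB, List.length_cons, prodsA, foldl_flatMap', List.foldl_map]
    have key : ∀ (b : Int × Int) (r : Int),
        dfsB users rest (stepB users (users.map F) e r) b
          = (prodsA rest.length).foldl (fun acc dc =>
              updB acc (leafB users (users.map (fun u => F u + paidFor u.1 (r :: dc) (e :: rest))))) b := by
      intro b r
      rw [stepB_map, ih]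
      congr 1
      funext acc dc
      congr 2
      apply List.map_congr_left
      intro u _
      rw [paidFor_cons, add_assoc]
    simp only [key]

theorem fold_bodies_eq (users : List (Int × Int)) (emoticons : List Int) :
    (prodsA emoticons.length).foldl (fun (acc : Int × Int) dc =>
        let pp := users.foldl (fun (s : Int × Int) u =>
            let paid := (PySem.List.pyRange 0 (PySem.List.len emoticons) 1).foldl (fun paid i =>
                if PySem.List.pyGetD dc i 0 ≥ u.1 then
                  paid + PySem.Int.floordiv (PySem.List.pyGetD emoticons i 0 * (100 - PySem.List.pyGetD dc i 0)) 100
                else paid) 0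
            if paid ≥ u.2 then (s.1 + 1, s.2) else (s.1, s.2 + paid)) ((0 : Int), (0 : Int))
        if acc.1 < pp.1 then pp
        else if acc.1 = pp.1 ∧ acc.2 < pp.2 then (acc.1, pp.2) else acc) ((0 : Int), (0 : Int))
      = (prodsA emoticons.length).foldl (fun acc dc =>
          updB acc (leafB users (users.map (fun u => (fun _ => (0 : Int)) u + paidFor u.1 dc emoticons)))) ((0 : Int), (0 : Int)) := by
  apply PySem.List.foldl_congr_mem
  intro acc dc hdc
  have hlen := prodsA_length _ dc hdc
  simp only [inner_loop_eq _ dc emoticons hlen, zero_add]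
  rw [← leaf_eq users (fun u => paidFor u.1 dc emoticons) ((0 : Int), (0 : Int))]
  rfl

theorem solution_spec : Claim_equal_solution := by
  unfold Claim_equal_solution
  intro users emoticons _
  unfold Spec_solution solution solution_alt
  rw [dfsB_eq users emoticons (fun _ => (0 : Int)) ((0 : Int), (0 : Int)), ← fold_bodies_eq]
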